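-- pv_equiv track=rewrite | github.com/zinebfadili/stream-routing-metaheuristics | constraint-programming/modelisation.py | get_first_links
-- ===== SOURCE A (Python) =====
-- def get_first_links(links, streams):
--     first_links = [[] for _ in range(len(streams))]
--     non_first_links = [[] for _ in range(len(streams))]
--     for idx_link, link in enumerate(links):
--         for idx_stream, stream in enumerate(streams):
--             if stream[0] == link[0]:
--                 first_links[idx_stream].append(idx_link)
--             else:
--                 non_first_links[idx_stream].append(idx_link)
--
--     return first_links, non_first_links
-- ===== SOURCE B (Python) =====
-- def get_first_links(links, streams):
--     if not links or not streams:
--         return [[] for _ in streams], [[] for _ in streams]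
--     by_source = {}
--     for idx_link, link in enumerate(links):
--         by_source.setdefault(link[0], []).append(idx_link)
--     first_links = []
--     non_first_links = []
--     for stream in streams:
--         firsts = list(by_source.get(stream[0], []))
--         firstset = set(firsts)
--         first_links.append(firsts)
--         non_first_links.append([i for i in range(len(links)) if i not in firstset])
--     return first_links, non_first_links
-- ===== Notes on version B (the rewrite author's own statement) =====
-- stated objective: idiomatic
-- what changed: Replaces A's interleaved double loop (classifying every link against every stream) by one grouping pass that indexes link ids by source in a dict, then per stream copies the group and takes the range complement; trivial empty inputs short-circuit.
import Mathlib
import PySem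

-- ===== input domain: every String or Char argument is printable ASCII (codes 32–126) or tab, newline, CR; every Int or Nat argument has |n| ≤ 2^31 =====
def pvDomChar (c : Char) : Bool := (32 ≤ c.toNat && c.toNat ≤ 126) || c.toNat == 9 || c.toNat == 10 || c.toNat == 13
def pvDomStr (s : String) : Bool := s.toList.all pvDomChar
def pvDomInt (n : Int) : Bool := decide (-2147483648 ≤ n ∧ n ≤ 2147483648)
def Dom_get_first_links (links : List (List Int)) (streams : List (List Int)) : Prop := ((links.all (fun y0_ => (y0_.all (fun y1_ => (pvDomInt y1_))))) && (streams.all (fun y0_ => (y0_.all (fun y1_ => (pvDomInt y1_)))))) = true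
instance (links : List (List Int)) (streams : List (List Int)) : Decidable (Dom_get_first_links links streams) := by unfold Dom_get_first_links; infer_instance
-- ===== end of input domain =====

-- B replaces A's interleaved link×stream double loop by one grouping pass (dict: source ↦ link indices)
-- plus a per-stream complement over range(len(links)), with a short-circuit for trivially empty inputs;
-- equal return values on Pre_.

-- ===== PORT A =====
def get_first_links (links : List (List Int)) (streams : List (List Int)) : List (List Int) × List (List Int) :=
  let first0 : List (List Int) := streams.map (fun _ => [])
  let non0 : List (List Int) := streams.map (fun _ => [])
  (PySem.List.enumerate links).foldl
    (fun st p =>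
      (PySem.List.enumerate streams).foldl
        (fun st q =>
          if PySem.List.pyGetD q.2 0 0 == PySem.List.pyGetD p.2 0 0 then
            (PySem.List.pySetD st.1 q.1 (PySem.List.pyGetD st.1 q.1 [] ++ [p.1]), st.2)
          else
            (st.1, PySem.List.pySetD st.2 q.1 (PySem.List.pyGetD st.2 q.1 [] ++ [p.1])))
        st)
    (first0, non0)

-- ===== PORT B =====
def get_first_links_alt (links : List (List Int)) (streams : List (List Int)) : List (List Int) × List (List Int) :=
  if links.isEmpty || streams.isEmpty then
    (streams.map (fun _ => []), streams.map (fun _ => []))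
  else
    let bySource : PySem.Dict Int (List Int) :=
      (PySem.List.enumerate links).foldl
        (fun d p => d.modify (PySem.List.pyGetD p.2 0 0) [] (fun v => v ++ [p.1]))
        PySem.Dict.empty
    streams.foldl
      (fun acc s =>
        let firsts : List Int := bySource.getD (PySem.List.pyGetD s 0 0) []
        let firstset : PySem.Set Int := PySem.Set.ofList firsts
        (acc.1 ++ [firsts],
         acc.2 ++ [(PySem.List.pyRange 0 (links.length : Int) 1).filter
                     (fun i => !(PySem.Set.contains firstset i))]))
      ([], [])

-- ===== PRECONDITION & SPEC =====
-- Pre_ excludes exactly the inputs where Python's A raises IndexError: links and streams both nonempty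
-- with some empty inner list (A then evaluates stream[0]/link[0] on an empty list); with an empty links
-- or streams list the inner indexing is never reached and both programs return.
def Pre_get_first_links (links : List (List Int)) (streams : List (List Int)) : Prop :=
  links = [] ∨ streams = [] ∨ ((∀ l ∈ links, l ≠ []) ∧ (∀ s ∈ streams, s ≠ []))
instance (links : List (List Int)) (streams : List (List Int)) : Decidable (Pre_get_first_links links streams) := by unfold Pre_get_first_links; infer_instance
def pvWitness_get_first_links : List (List Int) × List (List Int) :=
  ([[1, 2], [2, 3], [1, 4]], [[1, 9], [2, 9], [5]])

def Spec_get_first_links (links : List (List Int)) (streams : List (List Int)) (out : List (List Int) × List (List Int)) : Prop := out = get_first_links_alt links streams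
instance (links : List (List Int)) (streams : List (List Int)) (out : List (List Int) × List (List Int)) : Decidable (Spec_get_first_links links streams out) := by unfold Spec_get_first_links; infer_instance

-- ===== CLAIM (what is proved, stated in full; the proofs are below) =====
def Claim_equal_get_first_links : Prop := ∀ (links : List (List Int)) (streams : List (List Int)), Dom_get_first_links links streams → Pre_get_first_links links streams → Spec_get_first_links links streams (get_first_links links streams)

-- ===== LEMMAS AND PROOFS =====

-- selF m links s0 = indices (from start m) of links whose head matches s0; selN the complement.
def selF (m : Int) (links : List (List Int)) (s0 : Int) : List Int :=
  (PySem.List.enumerate links m).filterMap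
    (fun p => if PySem.List.pyGetD p.2 0 0 == s0 then some p.1 else none)

def selN (m : Int) (links : List (List Int)) (s0 : Int) : List Int :=
  (PySem.List.enumerate links m).filterMap
    (fun p => if PySem.List.pyGetD p.2 0 0 == s0 then none else some p.1)

theorem selF_nil (m s0 : Int) : selF m [] s0 = [] := rfl
theorem selN_nil (m s0 : Int) : selN m [] s0 = [] := rfl

theorem selF_cons (m : Int) (l : List Int) (links : List (List Int)) (s0 : Int) :
    selF m (l :: links) s0 =
      if PySem.List.pyGetD l 0 0 == s0 then m :: selF (m+1) links s0 else selF (m+1) links s0 := by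
  by_cases h : PySem.List.pyGetD l 0 0 = s0 <;>
    simp [selF, PySem.List.enumerate_cons, List.filterMap_cons, h]

theorem selN_cons (m : Int) (l : List Int) (links : List (List Int)) (s0 : Int) :
    selN m (l :: links) s0 =
      if PySem.List.pyGetD l 0 0 == s0 then selN (m+1) links s0 else m :: selN (m+1) links s0 := by
  by_cases h : PySem.List.pyGetD l 0 0 = s0 <;>
    simp [selN, PySem.List.enumerate_cons, List.filterMap_cons, h]

theorem selF_ge (m : Int) (links : List (List Int)) (s0 x : Int) (hx : x ∈ selF m links s0) : m ≤ x := by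
  induction links generalizing m with
  | nil => simp [selF_nil] at hx
  | cons l ls ih =>
    rw [selF_cons] at hx
    split at hx
    · rcases List.mem_cons.1 hx with h | h
      · omega
      · have := ih (m+1) h; omega
    · have := ih (m+1) hx; omega

theorem pv_set_append_len {α : Type} (xs : List α) (y v : α) (ys : List α) :
    (xs ++ y :: ys).set xs.length v = xs ++ v :: ys := by
  induction xs with
  | nil => rfl
  | cons a as ih => simp [List.set, ih]

theorem pv_getD_append_len {α : Type} (xs : List α) (y : α) (ys : List α) (d : α) :
    (xs ++ y :: ys).getD xs.length d = y := by
  induction xs with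
  | nil => rfl
  | cons a as ih => simpa [List.getD_cons_succ] using ih

theorem pv_zipWith_right_id {α β : Type} (s : List α) (F : List β) (h : F.length = s.length) :
    List.zipWith (fun _ f => f) s F = F := by
  induction s generalizing F with
  | nil => cases F <;> simp_all
  | cons a as ih => cases F with
    | nil => simp_all
    | cons f fs => simp_all

theorem pv_zipWith_zipWith_same {α β : Type} (k g : α → β → β) (s : List α) (F : List β) :
    List.zipWith k s (List.zipWith g s F) = List.zipWith (fun a b => k a (g a b)) s F := by
  induction s generalizing F with
  | nil => simp
  | cons a as ih => cases F <;> simp [ih]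

theorem pv_zipWith_map_const {α β γ : Type} (g : α → β → γ) (c : β) (s : List α) :
    List.zipWith g s (s.map (fun _ => c)) = s.map (fun a => g a c) := by
  induction s with
  | nil => rfl
  | cons a as ih => simp only [List.map_cons, List.zipWith_cons_cons, ih]

theorem pv_bool_ext {a b : Bool} (h : a = true ↔ b = true) : a = b := by
  cases a <;> cases b <;> simp_all

theorem pv_zipWith_ext {α β γ : Type} {f g : α → β → γ}
    (h : ∀ a b, f a b = g a b) (s : List α) (F : List β) :
    List.zipWith f s F = List.zipWith g s F := by
  have : f = g := funext fun a => funext (h a)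
  rw [this]

-- inner loop of A, one link (idx, with head l0): appends idx to exactly one of the two rows per stream
theorem innerA (idx l0 : Int) (streams : List (List Int)) :
    ∀ (Fd Fr Nd Nr : List (List Int)),
      Fr.length = streams.length → Nr.length = streams.length → Nd.length = Fd.length →
      (PySem.List.enumerate streams (Fd.length : Int)).foldl
        (fun st q =>
          if PySem.List.pyGetD q.2 0 0 == l0 then
            (PySem.List.pySetD st.1 q.1 (PySem.List.pyGetD st.1 q.1 [] ++ [idx]), st.2)
          else
            (st.1, PySem.List.pySetD st.2 q.1 (PySem.List.pyGetD st.2 q.1 [] ++ [idx])))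
        (Fd ++ Fr, Nd ++ Nr)
      = (Fd ++ List.zipWith (fun s f => if PySem.List.pyGetD s 0 0 == l0 then f ++ [idx] else f) streams Fr,
         Nd ++ List.zipWith (fun s n => if PySem.List.pyGetD s 0 0 == l0 then n else n ++ [idx]) streams Nr) := by
  induction streams with
  | nil =>
    intro Fd Fr Nd Nr hF hN _
    have hF0 : Fr = [] := List.length_eq_zero_iff.mp (by simpa using hF)
    have hN0 : Nr = [] := List.length_eq_zero_iff.mp (by simpa using hN)
    subst hF0; subst hN0
    simp [PySem.List.enumerate_nil]
  | cons s ss ih =>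
    intro Fd Fr Nd Nr hF hN hlen
    cases Fr with
    | nil => simp at hF
    | cons f Fr' =>
    cases Nr with
    | nil => simp at hN
    | cons n Nr' =>
    rw [PySem.List.enumerate_cons, List.foldl_cons]
    by_cases h : PySem.List.pyGetD s 0 0 == l0
    · have hget : PySem.List.pyGetD (Fd ++ f :: Fr') ((Fd.length : Nat) : Int) [] = f := by
        rw [PySem.List.pyGetD_natCast, pv_getD_append_len]
      have hset : PySem.List.pySetD (Fd ++ f :: Fr') ((Fd.length : Nat) : Int) (f ++ [idx]) = Fd ++ (f ++ [idx]) :: Fr' := by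
        rw [PySem.List.pySetD_natCast]
        simpa using pv_set_append_len Fd f (f ++ [idx]) Fr'
      simp only [h, if_pos, hget, hset]
      have ihh := ih (Fd ++ [f ++ [idx]]) Fr' (Nd ++ [n]) Nr'
        (by simpa using Nat.succ_injective hF) (by simpa using Nat.succ_injective hN)
        (by simp [hlen])
      simp only [List.length_append, List.length_cons, List.length_nil, Nat.cast_add,
        Nat.cast_one, Nat.cast_zero, zero_add, List.append_assoc, List.singleton_append] at ihh ⊢
      rw [ihh]
      simp [List.zipWith_cons_cons, eq_of_beq h]
    · have hget : PySem.List.pyGetD (Nd ++ n :: Nr') ((Fd.length : Nat) : Int) [] = n := by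
        rw [PySem.List.pyGetD_natCast, ← hlen, pv_getD_append_len]
      have hset : PySem.List.pySetD (Nd ++ n :: Nr') ((Fd.length : Nat) : Int) (n ++ [idx]) = Nd ++ (n ++ [idx]) :: Nr' := by
        rw [PySem.List.pySetD_natCast, ← hlen]
        simpa using pv_set_append_len Nd n (n ++ [idx]) Nr'
      simp only [h, if_neg, Bool.not_eq_true, hget, hset]
      have ihh := ih (Fd ++ [f]) Fr' (Nd ++ [n ++ [idx]]) Nr'
        (by simpa using Nat.succ_injective hF) (by simpa using Nat.succ_injective hN)
        (by simp [hlen])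
      simp only [List.length_append, List.length_cons, List.length_nil, Nat.cast_add,
        Nat.cast_one, Nat.cast_zero, zero_add, List.append_assoc, List.singleton_append] at ihh ⊢
      rw [ihh]
      have h' : PySem.List.pyGetD s 0 0 ≠ l0 := by simpa using h
      simp [List.zipWith_cons_cons, h']

-- outer loop of A
theorem outerA (streams : List (List Int)) :
    ∀ (links : List (List Int)) (m : Int) (F N : List (List Int)),
      F.length = streams.length → N.length = streams.length →
      (PySem.List.enumerate links m).foldl
        (fun st p =>
          (PySem.List.enumerate streams).foldl
            (fun st q =>
              if PySem.List.pyGetD q.2 0 0 == PySem.List.pyGetD p.2 0 0 then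
                (PySem.List.pySetD st.1 q.1 (PySem.List.pyGetD st.1 q.1 [] ++ [p.1]), st.2)
              else
                (st.1, PySem.List.pySetD st.2 q.1 (PySem.List.pyGetD st.2 q.1 [] ++ [p.1])))
            st)
        (F, N)
      = (List.zipWith (fun s f => f ++ selF m links (PySem.List.pyGetD s 0 0)) streams F,
         List.zipWith (fun s n => n ++ selN m links (PySem.List.pyGetD s 0 0)) streams N) := by
  intro links
  induction links with
  | nil =>
    intro m F N hF hN
    simp only [PySem.List.enumerate_nil, List.foldl_nil, selF_nil, selN_nil, List.append_nil]
    rw [pv_zipWith_right_id _ _ hF, pv_zipWith_right_id _ _ hN]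
  | cons l ls ih =>
    intro m F N hF hN
    rw [PySem.List.enumerate_cons, List.foldl_cons]
    have hin := innerA m (PySem.List.pyGetD l 0 0) streams [] F [] N (by simpa using hF) (by simpa using hN) rfl
    simp only [List.nil_append, List.length_nil, Nat.cast_zero] at hin
    rw [hin]
    rw [ih (m + 1) _ _ (by simp [hF]) (by simp [hN])]
    rw [pv_zipWith_zipWith_same, pv_zipWith_zipWith_same]
    simp only [Prod.mk.injEq]
    constructor
    · apply pv_zipWith_ext
      intro a b
      rw [selF_cons]
      by_cases h : PySem.List.pyGetD a 0 0 = PySem.List.pyGetD l 0 0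
      · simp [h]
      · simp [h, Ne.symm h]
    · apply pv_zipWith_ext
      intro a b
      rw [selN_cons]
      by_cases h : PySem.List.pyGetD a 0 0 = PySem.List.pyGetD l 0 0
      · simp [h]
      · simp [h, Ne.symm h]

theorem A_closed (links streams : List (List Int)) :
    get_first_links links streams =
      (streams.map (fun s => selF 0 links (PySem.List.pyGetD s 0 0)),
       streams.map (fun s => selN 0 links (PySem.List.pyGetD s 0 0))) := by
  unfold get_first_links
  rw [outerA streams links 0 _ _ (by simp) (by simp)]
  rw [pv_zipWith_map_const, pv_zipWith_map_const]
  simp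

theorem dictB (links : List (List Int)) (k : Int) :
    ∀ (m : Int) (d : PySem.Dict Int (List Int)),
      ((PySem.List.enumerate links m).foldl
        (fun d p => d.modify (PySem.List.pyGetD p.2 0 0) [] (fun v => v ++ [p.1])) d).getD k []
      = d.getD k [] ++ selF m links k := by
  induction links with
  | nil => intro m d; simp [PySem.List.enumerate_nil, selF_nil]
  | cons l ls ih =>
    intro m d
    rw [PySem.List.enumerate_cons, List.foldl_cons, ih (m+1), selF_cons]
    by_cases h : PySem.List.pyGetD l 0 0 = k
    · simp [h, PySem.Dict.getD_modify]
    · have h' : ¬ (PySem.List.pyGetD l 0 0 == k) := by simpa using h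
      simp [h', PySem.Dict.getD_modify, Ne.symm h]

theorem rangeFilter (s0 : Int) :
    ∀ (links : List (List Int)) (m : Int),
      (PySem.List.pyRange m (m + links.length) 1).filter
          (fun i => !(PySem.Set.contains (PySem.Set.ofList (selF m links s0)) i))
        = selN m links s0 := by
  intro links
  induction links with
  | nil =>
    intro m
    rw [PySem.List.pyRange_one_eq_nil (by simp)]
    simp [selN_nil]
  | cons l ls ih =>
    intro m
    have hlt : m < m + ((l :: ls).length : Int) := by simp
    rw [PySem.List.pyRange_one_cons hlt, List.filter_cons]
    have hrange : PySem.List.pyRange (m+1) (m + ((l :: ls).length : Int)) 1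
        = PySem.List.pyRange (m+1) ((m+1) + (ls.length : Int)) 1 := by
      congr 1
      simp
      omega
    have hmem : ∀ i : Int, m + 1 ≤ i →
        ((i ∈ selF m (l :: ls) s0) ↔ (i ∈ selF (m+1) ls s0)) := by
      intro i hgt
      rw [selF_cons]
      split
      · simp only [List.mem_cons]
        constructor
        · rintro (rfl | hh)
          · omega
          · exact hh
        · exact Or.inr
      · exact Iff.rfl
    have e1 : List.filter (fun i => !(PySem.Set.contains (PySem.Set.ofList (selF m (l :: ls) s0)) i))
        (PySem.List.pyRange (m+1) (m + ((l :: ls).length : Int)) 1) = selN (m+1) ls s0 := by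
      rw [hrange, ← ih (m+1)]
      apply List.filter_congr
      intro i hi
      have hgt : m + 1 ≤ i := (PySem.List.mem_pyRange_one.1 hi).1
      have hiff : (PySem.Set.contains (PySem.Set.ofList (selF m (l :: ls) s0)) i)
          = (PySem.Set.contains (PySem.Set.ofList (selF (m+1) ls s0)) i) := by
        apply pv_bool_ext
        rw [PySem.Set.contains_iff, PySem.Set.contains_iff, PySem.Set.mem_ofList, PySem.Set.mem_ofList]
        exact hmem i hgt
      rw [hiff]
    rw [e1, selN_cons]
    by_cases h : PySem.List.pyGetD l 0 0 = s0
    · have hm : m ∈ selF m (l :: ls) s0 := by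
        rw [selF_cons, if_pos (by simp [h])]
        exact List.mem_cons_self
      simp [hm, h]
    · have hm : m ∉ selF m (l :: ls) s0 := by
        rw [selF_cons, if_neg (by simp [h])]
        intro hmem'
        exact absurd (selF_ge (m+1) ls s0 m hmem') (by omega)
      simp [hm, h]

theorem foldl_pair_append {α β γ : Type} (f : α → β) (g : α → γ) :
    ∀ (xs : List α) (a : List β) (b : List γ),
      xs.foldl (fun acc s => (acc.1 ++ [f s], acc.2 ++ [g s])) (a, b)
        = (a ++ xs.map f, b ++ xs.map g) := by
  intro xs
  induction xs with
  | nil => intro a b; simp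
  | cons x xs ih => intro a b; simp [ih]

theorem B_closed (links streams : List (List Int)) :
    get_first_links_alt links streams =
      (streams.map (fun s => selF 0 links (PySem.List.pyGetD s 0 0)),
       streams.map (fun s => selN 0 links (PySem.List.pyGetD s 0 0))) := by
  unfold get_first_links_alt
  by_cases hg : (links.isEmpty || streams.isEmpty) = true
  · rw [if_pos hg]
    rcases Bool.or_eq_true_iff.mp hg with h | h
    · have : links = [] := List.isEmpty_iff.mp h
      subst this
      simp [selF_nil, selN_nil]
    · have : streams = [] := List.isEmpty_iff.mp h
      subst this
      simp
  · rw [if_neg hg]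
    simp only []
    refine (foldl_pair_append _ _ streams [] []).trans ?_
    simp only [List.nil_append, Prod.mk.injEq]
    constructor
    · apply List.map_congr_left
      intro s _
      rw [dictB links _ 0 PySem.Dict.empty]
      simp [PySem.Dict.getD_empty]
    · apply List.map_congr_left
      intro s _
      have hd : ((PySem.List.enumerate links).foldl
          (fun d p => d.modify (PySem.List.pyGetD p.2 0 0) [] (fun v => v ++ [p.1]))
          PySem.Dict.empty).getD (PySem.List.pyGetD s 0 0) [] = selF 0 links (PySem.List.pyGetD s 0 0) := by
        rw [dictB links _ 0 PySem.Dict.empty]; simp [PySem.Dict.getD_empty]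
      rw [hd]
      have := rangeFilter (PySem.List.pyGetD s 0 0) links 0
      simpa using this

-- ===== VERDICT (by name: the statement is the Claim_ definition above) =====
theorem get_first_links_spec : Claim_equal_get_first_links := by
  intro links streams _ _
  unfold Spec_get_first_links
  rw [A_closed, B_closed]
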